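-- pv_equiv track=rewrite | github.com/wazo-platform/xivo-dao | xivo-dao/xivo_dao/directory_dao.py | _merge_number_attributes
-- ===== SOURCE A (Python) =====
-- NUMBER_TYPE = 'number'
--
-- def _merge_number_attributes(attribute_list):
--     first_number_type = True
--     header_list = []
--     for attribute in attribute_list:
--         attribute_name, attribute_type = attribute
--         if attribute_type == NUMBER_TYPE:
--             if first_number_type:
--                 header_list.append(attribute)
--                 first_number_type = False
--         else:
--             header_list.append(attribute)
--     return header_list
-- ===== SOURCE B (Python) =====
-- NUMBER_TYPE = 'number'
--
-- def _merge_number_attributes(attribute_list):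
--     first_idx = next((i for i, a in enumerate(attribute_list) if a[1] == NUMBER_TYPE), None)
--     return [a for i, a in enumerate(attribute_list)
--             if a[1] != NUMBER_TYPE or i == first_idx]
-- ===== Notes on version B (the rewrite author's own statement) =====
-- stated objective: alternative
-- what changed: Replaces the boolean flag threaded through a mutating accumulation loop by a two-phase structure: first compute the index of the first number-type attribute, then keep every attribute in one comprehension whose type is not number or whose index is that first index.
import Mathlib
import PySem

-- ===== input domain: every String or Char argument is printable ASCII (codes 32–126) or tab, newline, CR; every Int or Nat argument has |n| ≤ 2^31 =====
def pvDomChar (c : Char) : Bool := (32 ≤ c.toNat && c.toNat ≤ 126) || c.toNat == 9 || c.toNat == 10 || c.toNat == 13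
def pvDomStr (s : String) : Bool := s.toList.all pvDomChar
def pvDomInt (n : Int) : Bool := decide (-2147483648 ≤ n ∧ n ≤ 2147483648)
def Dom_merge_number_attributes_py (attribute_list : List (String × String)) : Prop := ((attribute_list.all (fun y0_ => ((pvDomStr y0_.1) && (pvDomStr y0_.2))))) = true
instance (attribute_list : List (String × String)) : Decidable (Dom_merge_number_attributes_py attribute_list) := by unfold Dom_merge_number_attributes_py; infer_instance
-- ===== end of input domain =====

-- B differs in decomposition: A threads a boolean flag through one accumulating loop;
-- B first finds the index of the first number-type attribute, then filters by that index.

-- ===== PORT A =====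
-- one loop step of A: flag 'first_number_type' and accumulator 'header_list'
def pvMergeStep (st : Bool × List (String × String)) (attr : String × String) :
    Bool × List (String × String) :=
  if attr.2 == "number" then
    (if st.1 then (false, st.2 ++ [attr]) else st)
  else
    (st.1, st.2 ++ [attr])

def merge_number_attributes_py (attribute_list : List (String × String)) : List (String × String) :=
  (attribute_list.foldl pvMergeStep (true, [])).2

-- ===== PORT B =====
def merge_number_attributes_py_alt (attribute_list : List (String × String)) : List (String × String) :=
  let first_idx : Option Int :=
    (PySem.List.enumerate attribute_list).findSome?
      (fun p => if p.2.2 == "number" then some p.1 else none)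
  ((PySem.List.enumerate attribute_list).filter
      (fun p => p.2.2 != "number" || decide (some p.1 = first_idx))).map (·.2)

-- ===== PRECONDITION & SPEC =====
def Spec_merge_number_attributes_py (attribute_list : List (String × String)) (out : List (String × String)) : Prop := out = merge_number_attributes_py_alt attribute_list
instance (attribute_list : List (String × String)) (out : List (String × String)) : Decidable (Spec_merge_number_attributes_py attribute_list out) := by unfold Spec_merge_number_attributes_py; infer_instance

-- ===== CLAIM (what is proved, stated in full; the proofs are below) =====
def Claim_equal_merge_number_attributes_py : Prop := ∀ (attribute_list : List (String × String)), Dom_merge_number_attributes_py attribute_list → Spec_merge_number_attributes_py attribute_list (merge_number_attributes_py attribute_list)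

-- ===== LEMMAS AND PROOFS =====

-- canonical characterisation: keep everything up to and including the first number-type
-- attribute, then drop all further number-type attributes
def pvCanon : List (String × String) → List (String × String)
  | [] => []
  | a :: t => if a.2 == "number" then a :: t.filter (fun b => b.2 != "number") else a :: pvCanon t

theorem pvA_false (l : List (String × String)) (acc : List (String × String)) :
    l.foldl pvMergeStep (false, acc) = (false, acc ++ l.filter (fun b => b.2 != "number")) := by
  induction l generalizing acc with
  | nil => simp
  | cons a t ih =>
    by_cases h : a.2 = "number" <;>
      simp [pvMergeStep, h, ih]

theorem pvA_true (l : List (String × String)) (acc : List (String × String)) :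
    (l.foldl pvMergeStep (true, acc)).2 = acc ++ pvCanon l := by
  induction l generalizing acc with
  | nil => simp [pvCanon]
  | cons a t ih =>
    by_cases h : a.2 = "number"
    · simp [pvMergeStep, h, pvCanon, pvA_false]
    · simp [pvMergeStep, h, pvCanon, ih]

-- projecting the values out of a filtered enumeration when the test ignores the index
theorem pvFilterSndEnum (l : List (String × String)) (s : Int) :
    ((PySem.List.enumerate l s).filter (fun p => p.2.2 != "number")).map (·.2)
      = l.filter (fun b => b.2 != "number") := by
  induction l generalizing s with
  | nil => simp [PySem.List.enumerate_nil]
  | cons a t ih =>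
    rw [PySem.List.enumerate_cons]
    by_cases h : a.2 = "number" <;> simp [h, ih]

theorem pvB_shift (l : List (String × String)) (s : Int) :
    ((PySem.List.enumerate l s).filter
        (fun p => p.2.2 != "number" ||
          decide (some p.1 = (PySem.List.enumerate l s).findSome?
            (fun p => if p.2.2 == "number" then some p.1 else none)))).map (·.2)
      = pvCanon l := by
  induction l generalizing s with
  | nil => simp [PySem.List.enumerate_nil, pvCanon]
  | cons a t ih =>
    rw [PySem.List.enumerate_cons]
    by_cases h : a.2 = "number"
    · -- first number found at index s; tail indices are all ≠ s
      have hfind : (List.findSome? (fun p => if (p.2.2 == "number") = true then some p.1 else none)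
          (((s, a) : Int × (String × String)) :: PySem.List.enumerate t (s + 1))) = some s := by
        simp [h]
      rw [hfind]
      have htail : ∀ p ∈ PySem.List.enumerate t (s + 1),
          (p.2.2 != "number" || decide ((some p.1 : Option Int) = some s)) = (p.2.2 != "number") := by
        intro p hp
        rcases (PySem.List.mem_enumerate_iff _ _ _).1 hp with ⟨k, hk, rfl⟩
        have hne : s + 1 + (k : Int) ≠ s := by omega
        simp [hne]
      simp only [List.filter_cons, decide_true, Bool.or_true]
      rw [if_pos trivial, List.map_cons, List.filter_congr htail, pvFilterSndEnum]
      simp [pvCanon, h]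
    · -- head is not number-type: findSome? skips it, head is kept
      have hfind : (List.findSome? (fun p => if (p.2.2 == "number") = true then some p.1 else none)
          (((s, a) : Int × (String × String)) :: PySem.List.enumerate t (s + 1)))
          = List.findSome? (fun p => if (p.2.2 == "number") = true then some p.1 else none)
              (PySem.List.enumerate t (s + 1)) := by
        simp [h]
      rw [hfind]
      simp only [List.filter_cons]
      have hkeep : ((a.2 != "number" ||
          decide ((some s : Option Int) = List.findSome?
            (fun p => if (p.2.2 == "number") = true then some p.1 else none)
            (PySem.List.enumerate t (s + 1))))) = true := by
        simp [h]
      rw [if_pos hkeep, List.map_cons, ih (s + 1)]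
      simp [pvCanon, h]

-- ===== VERDICT (by name: the statement is the Claim_ definition above) =====
theorem merge_number_attributes_py_spec : Claim_equal_merge_number_attributes_py := by
  intro l _
  unfold Spec_merge_number_attributes_py merge_number_attributes_py merge_number_attributes_py_alt
  rw [pvA_true, pvB_shift]
  simp
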